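-- pv_equiv track=rewrite | github.com/hamzashahid711/PaperTrading | FlaskServer.py | typeTrim
-- ===== SOURCE A (Python) =====
-- def typeTrim(type):
--     capitalCount = 0
--     newType = ""
--     for i in type:
--         if i.isupper():
--             capitalCount = capitalCount + 1
--         if capitalCount > 1:
--             break
--         newType = newType + i
--     return newType
-- ===== SOURCE B (Python) =====
-- def typeTrim(type):
--     count = 0
--     for idx, ch in enumerate(type):
--         if ch.isupper():
--             count += 1
--             if count == 2:
--                 return type[:idx]
--     return type
-- ===== Notes on version B (the rewrite author's own statement) =====
-- stated objective: simpler
-- what changed: Replaces incremental string accumulation with locating the index of the second uppercase letter and returning a single slice (or the whole string unchanged).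
import Mathlib
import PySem

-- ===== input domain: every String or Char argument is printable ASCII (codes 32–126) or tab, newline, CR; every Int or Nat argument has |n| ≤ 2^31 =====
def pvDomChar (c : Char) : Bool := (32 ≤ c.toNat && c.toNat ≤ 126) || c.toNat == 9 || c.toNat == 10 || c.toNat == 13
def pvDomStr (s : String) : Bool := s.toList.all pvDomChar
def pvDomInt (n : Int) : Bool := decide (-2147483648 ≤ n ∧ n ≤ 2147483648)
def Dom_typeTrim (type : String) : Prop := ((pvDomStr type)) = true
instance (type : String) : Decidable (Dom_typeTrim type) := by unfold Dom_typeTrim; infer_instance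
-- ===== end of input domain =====

-- B replaces A's incremental string accumulation by locating the index of the
-- second uppercase letter and returning a single slice (objective: simpler).

-- ===== PORT A =====
-- loop of A: state (capitalCount, newType); 'break' = stop and return the accumulator
def typeTrimGo : List Char → Int → List Char → List Char
  | [], _, acc => acc
  | c :: rest, cnt, acc =>
    let cnt' := if PySem.Chars.isupper c then cnt + 1 else cnt
    if cnt' > 1 then acc else typeTrimGo rest cnt' (acc ++ [c])

def typeTrim (type : String) : String :=
  String.ofList (typeTrimGo type.toList 0 [])

-- ===== PORT B =====
-- loop of B: enumerate, count uppercase, return the index of the second one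
def typeTrimAltGo : List Char → Int → Nat → Option Nat
  | [], _, _ => none
  | c :: rest, cnt, i =>
    if PySem.Chars.isupper c then
      if cnt + 1 = 2 then some i else typeTrimAltGo rest (cnt + 1) (i + 1)
    else typeTrimAltGo rest cnt (i + 1)

def typeTrim_alt (type : String) : String :=
  match typeTrimAltGo type.toList 0 0 with
  | some i => PySem.Str.slice type none (some (i : Int))   -- type[:idx]
  | none => type

-- ===== PRECONDITION & SPEC =====
def Spec_typeTrim (type : String) (out : String) : Prop := out = typeTrim_alt type
instance (type : String) (out : String) : Decidable (Spec_typeTrim type out) := by unfold Spec_typeTrim; infer_instance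

-- ===== CLAIM (what is proved, stated in full; the proofs are below) =====
def Claim_equal_typeTrim : Prop := ∀ (type : String), Dom_typeTrim type → Spec_typeTrim type (typeTrim type)

-- ===== LEMMAS AND PROOFS =====

theorem altGo_ge (l : List Char) (cnt : Int) (i j : Nat)
    (h : typeTrimAltGo l cnt i = some j) : i ≤ j := by
  induction l generalizing cnt i with
  | nil => simp [typeTrimAltGo] at h
  | cons c rest ih =>
    simp only [typeTrimAltGo] at h
    split_ifs at h with h1 h2
    · exact Nat.le_of_eq (Option.some.inj h)
    · exact Nat.le_of_succ_le (ih _ _ h)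
    · exact Nat.le_of_succ_le (ih _ _ h)

theorem main_lemma (l : List Char) (cnt : Int) (acc : List Char) (i : Nat)
    (hcnt : cnt = 0 ∨ cnt = 1) :
    typeTrimGo l cnt acc =
      (match typeTrimAltGo l cnt i with
       | some j => acc ++ l.take (j - i)
       | none => acc ++ l) := by
  induction l generalizing cnt acc i with
  | nil => simp [typeTrimGo, typeTrimAltGo]
  | cons c rest ih =>
    simp only [typeTrimGo, typeTrimAltGo]
    by_cases hu : PySem.Chars.isupper c = true
    · simp only [hu, if_true]
      rcases hcnt with h0 | h1
      · subst h0
        norm_num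
        rw [ih 1 (acc ++ [c]) (i + 1) (Or.inr rfl)]
        cases hb : typeTrimAltGo rest 1 (i + 1) with
        | none => simp
        | some j =>
          have hij := altGo_ge rest 1 (i + 1) j hb
          simp only [List.append_assoc, List.singleton_append]
          have : (c :: rest).take (j - i) = c :: rest.take (j - (i + 1)) := by
            have h1 : j - i = (j - (i + 1)) + 1 := by omega
            rw [h1, List.take_succ_cons]
          rw [this]
      · subst h1
        norm_num
    · rw [Bool.not_eq_true] at hu
      simp only [hu, Bool.false_eq_true, if_false]
      have hng : ¬ (cnt > 1) := by omega
      rw [if_neg hng]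
      rw [ih cnt (acc ++ [c]) (i + 1) hcnt]
      cases hb : typeTrimAltGo rest cnt (i + 1) with
      | none => simp
      | some j =>
        have hij := altGo_ge rest cnt (i + 1) j hb
        simp only [List.append_assoc, List.singleton_append]
        have : (c :: rest).take (j - i) = c :: rest.take (j - (i + 1)) := by
          have h1 : j - i = (j - (i + 1)) + 1 := by omega
          rw [h1, List.take_succ_cons]
        rw [this]

-- ===== VERDICT (by name: the statement is the Claim_ definition above) =====
theorem typeTrim_spec : Claim_equal_typeTrim := by
  intro type _
  unfold Spec_typeTrim typeTrim typeTrim_alt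
  rw [main_lemma type.toList 0 [] 0 (Or.inl rfl)]
  cases hb : typeTrimAltGo type.toList 0 0 with
  | none => exact String.ext (by simp)
  | some j =>
    simp only [List.nil_append, Nat.sub_zero]
    apply String.ext
    rw [PySem.Str.toList_slice]
    simp [PySem.Chars.slice, PySem.List.slice_to_natCast]
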